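-- pv_equiv track=rewrite | github.com/pepperpepperpepper/voicepipe | voicepipe/transcript_triggers.py | _split_dispatch_verb
-- ===== SOURCE A (Python) =====
-- _DISPATCH_SEPARATORS = (",", ":", ";", ".")
--
-- def _split_dispatch_verb(prompt: str) -> tuple[str, str]:
--     cleaned = (prompt or "").strip()
--     if not cleaned:
--         return "", ""
--
--     i = 0
--     while i < len(cleaned) and not cleaned[i].isspace() and cleaned[i] not in _DISPATCH_SEPARATORS:
--         i += 1
--
--     verb = cleaned[:i].strip().lower()
--     j = i
--     if j < len(cleaned) and cleaned[j] in _DISPATCH_SEPARATORS: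
--         j += 1
--     while j < len(cleaned) and cleaned[j].isspace():
--         j += 1
--     args = cleaned[j:]
--     return verb, args
-- ===== SOURCE B (Python) =====
-- import re
--
-- # One regex does the whole parse: maximal separator/whitespace-free verb,
-- # at most one optional separator, then any whitespace, then the rest.
-- _VERB_RE = re.compile(r'([^\s,:;.]*)[,:;.]?\s*(.*)', re.DOTALL)
--
--
-- def _split_dispatch_verb(prompt: str) -> tuple[str, str]:
--     m = _VERB_RE.match((prompt or "").strip())
--     return m.group(1).lower(), m.group(2)
-- ===== Notes on version B (the rewrite author's own statement) =====
-- stated objective: idiomatic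
-- what changed: Replaces the two index-advancing while loops and the manual separator/whitespace skipping with a single precompiled regex match (verb group, optional separator, whitespace, rest group), dropping the redundant empty-string guard and redundant re-strip of the verb; the scan runs in the C regex engine instead of a per-character Python loop.
import Mathlib
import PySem

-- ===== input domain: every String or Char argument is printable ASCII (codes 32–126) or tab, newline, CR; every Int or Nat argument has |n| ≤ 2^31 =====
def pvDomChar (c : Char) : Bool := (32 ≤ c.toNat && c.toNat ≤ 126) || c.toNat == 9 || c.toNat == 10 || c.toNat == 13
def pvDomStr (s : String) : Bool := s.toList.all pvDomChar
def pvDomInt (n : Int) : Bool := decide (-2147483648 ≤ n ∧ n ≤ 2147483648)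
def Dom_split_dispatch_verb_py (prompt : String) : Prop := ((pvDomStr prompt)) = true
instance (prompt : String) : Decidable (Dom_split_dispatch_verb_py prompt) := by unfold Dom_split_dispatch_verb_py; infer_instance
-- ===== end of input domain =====

-- B replaces A's two index-advancing while loops with a single regex match (idiomatic; same cost).

-- ===== PORT A =====
-- cleaned[i] in _DISPATCH_SEPARATORS
def pvSep (c : Char) : Bool := c = ',' || c = ':' || c = ';' || c = '.'

-- first while loop: advance i while cleaned[i] is neither whitespace nor a separator
def pvScanVerb (s : List Char) (i : Nat) : Nat :=
  if h : i < s.length then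
    if !PySem.Chars.isspace s[i] && !pvSep s[i] then pvScanVerb s (i + 1) else i
  else i
termination_by s.length - i

-- second while loop: advance j over whitespace
def pvScanSpace (s : List Char) (j : Nat) : Nat :=
  if h : j < s.length then
    if PySem.Chars.isspace s[j] then pvScanSpace s (j + 1) else j
  else j
termination_by s.length - j

def split_dispatch_verb_py (prompt : String) : String × String :=
  let cleaned := (PySem.Str.strip prompt).toList
  if cleaned = [] then ("", "")
  else
    let i := pvScanVerb cleaned 0
    let verb := PySem.Chars.lower (PySem.Chars.strip (cleaned.take i))  -- cleaned[:i].strip().lower()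
    let j := if h : i < cleaned.length then (if pvSep cleaned[i] then i + 1 else i) else i
    let j2 := pvScanSpace cleaned j
    (String.ofList verb, String.ofList (cleaned.drop j2))  -- cleaned[j:]

-- ===== PORT B =====
-- regex r'([^\s,:;.]*)[,:;.]?\s*(.*)' (DOTALL) ported by its left-to-right greedy contract:
-- group 1 = maximal run of non-whitespace non-separator chars, then at most one separator,
-- then maximal whitespace, group 2 = everything after.
def split_dispatch_verb_py_alt (prompt : String) : String × String :=
  let cleaned := (PySem.Str.strip prompt).toList
  let g1 := cleaned.takeWhile (fun c => !PySem.Chars.isspace c && !pvSep c)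
  let afterVerb := cleaned.drop g1.length
  let afterSep := match afterVerb with
    | c :: t => if pvSep c then t else c :: t
    | [] => []
  (String.ofList (PySem.Chars.lower g1), String.ofList (afterSep.dropWhile PySem.Chars.isspace))

-- ===== PRECONDITION & SPEC =====
def Spec_split_dispatch_verb_py (prompt : String) (out : String × String) : Prop := out = split_dispatch_verb_py_alt prompt
instance (prompt : String) (out : String × String) : Decidable (Spec_split_dispatch_verb_py prompt out) := by unfold Spec_split_dispatch_verb_py; infer_instance

-- ===== CLAIM (what is proved, stated in full; the proofs are below) =====
def Claim_equal_split_dispatch_verb_py : Prop := ∀ (prompt : String), Dom_split_dispatch_verb_py prompt → Spec_split_dispatch_verb_py prompt (split_dispatch_verb_py prompt)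

-- ===== LEMMAS AND PROOFS =====

-- the index loops compute the length of the corresponding takeWhile
theorem pvScanVerb_eq (s : List Char) (i : Nat) :
    pvScanVerb s i = i + ((s.drop i).takeWhile (fun c => !PySem.Chars.isspace c && !pvSep c)).length := by
  fun_induction pvScanVerb s i with
  | case1 i h hc ih =>
    rw [ih, List.drop_eq_getElem_cons h, List.takeWhile_cons, hc]
    simp; omega
  | case2 i h hc =>
    rw [List.drop_eq_getElem_cons h, List.takeWhile_cons]
    simp [Bool.eq_false_iff.mpr hc]
  | case3 i h =>
    rw [List.drop_eq_nil_of_le (by omega)]; simp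

theorem pvScanSpace_eq (s : List Char) (j : Nat) :
    pvScanSpace s j = j + ((s.drop j).takeWhile PySem.Chars.isspace).length := by
  fun_induction pvScanSpace s j with
  | case1 j h hc ih =>
    rw [ih, List.drop_eq_getElem_cons h, List.takeWhile_cons, hc]
    simp; omega
  | case2 j h hc =>
    rw [List.drop_eq_getElem_cons h, List.takeWhile_cons]
    simp [Bool.eq_false_iff.mpr hc]
  | case3 j h =>
    rw [List.drop_eq_nil_of_le (by omega)]; simp

theorem take_len_takeWhile {α} (p : α → Bool) (l : List α) :
    l.take (l.takeWhile p).length = l.takeWhile p := by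
  induction l with
  | nil => rfl
  | cons a t ih =>
    by_cases hp : p a <;> simp [hp, ih]

theorem drop_len_takeWhile {α} (p : α → Bool) (l : List α) :
    l.drop (l.takeWhile p).length = l.dropWhile p := by
  induction l with
  | nil => rfl
  | cons a t ih =>
    by_cases hp : p a <;> simp [hp, ih]

theorem strip_of_no_space (l : List Char) (h : ∀ c ∈ l, PySem.Chars.isspace c = false) :
    PySem.Chars.strip l = l := by
  have h1 : List.dropWhile PySem.Chars.isspace l = l := by
    rw [List.dropWhile_eq_self_iff]; intro hne; simp [h _ (List.getElem_mem hne)]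
  have h2 : List.dropWhile PySem.Chars.isspace l.reverse = l.reverse := by
    rw [List.dropWhile_eq_self_iff]; intro hne
    have hl : 0 < l.length := by simpa using hne
    simp [h _ (List.getElem_mem (show l.length - 1 < l.length by omega))]
  simp [PySem.Chars.strip, PySem.Chars.lstrip, PySem.Chars.rstrip, h1, h2]

-- ===== VERDICT (by name: the statement is the Claim_ definition above) =====
theorem drop_scanSpace (l : List Char) (j : Nat) :
    l.drop (pvScanSpace l j) = (l.drop j).dropWhile PySem.Chars.isspace := by
  rw [pvScanSpace_eq, ← drop_len_takeWhile PySem.Chars.isspace (l.drop j), List.drop_drop]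

theorem main_core (l : List Char) :
    (if l = [] then (("" : String), ("" : String))
     else
       (String.ofList (PySem.Chars.lower (PySem.Chars.strip (l.take (pvScanVerb l 0)))),
        String.ofList (l.drop (pvScanSpace l
          (if h : pvScanVerb l 0 < l.length then
            (if pvSep l[pvScanVerb l 0] then pvScanVerb l 0 + 1 else pvScanVerb l 0)
           else pvScanVerb l 0)))))
    = (String.ofList (PySem.Chars.lower (l.takeWhile (fun c => !PySem.Chars.isspace c && !pvSep c))),
       String.ofList ((match l.drop (l.takeWhile (fun c => !PySem.Chars.isspace c && !pvSep c)).length with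
         | c :: t => if pvSep c then t else c :: t
         | [] => ([] : List Char)).dropWhile PySem.Chars.isspace)) := by
  set p : Char → Bool := fun c => !PySem.Chars.isspace c && !pvSep c with hp
  have hi : pvScanVerb l 0 = (l.takeWhile p).length := by simpa using pvScanVerb_eq l 0
  have hverb : PySem.Chars.strip (l.take (pvScanVerb l 0)) = l.takeWhile p := by
    rw [hi, take_len_takeWhile]
    apply strip_of_no_space
    intro c hc
    have hpc := List.mem_takeWhile_imp hc
    rw [hp] at hpc; simp at hpc; exact hpc.1
  have hdrop : l.drop (pvScanVerb l 0) = l.dropWhile p := by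
    rw [hi]; exact drop_len_takeWhile p l
  rcases hD : l.dropWhile p with _ | ⟨c, t⟩
  · -- everything after the verb is empty
    have hge : l.length ≤ pvScanVerb l 0 := by
      rw [← List.drop_eq_nil_iff]; rw [hdrop, hD]
    have hnil2 : l.drop (pvScanVerb l 0) = [] := by rw [hdrop, hD]
    by_cases hnil : l = []
    · subst hnil; simp [PySem.Chars.lower]
    · rw [if_neg hnil, dif_neg (by omega), hverb, ← hi, drop_scanSpace, hnil2]
  · -- a first char c remains after the verb
    have hne : l.drop (pvScanVerb l 0) ≠ [] := by rw [hdrop, hD]; simp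
    have hlt : pvScanVerb l 0 < l.length := by
      by_contra hge
      exact hne (List.drop_eq_nil_of_le (by omega))
    have hnil : l ≠ [] := by intro h; subst h; simp at hlt
    have hcons : l[pvScanVerb l 0] :: l.drop (pvScanVerb l 0 + 1) = c :: t := by
      rw [← List.drop_eq_getElem_cons hlt, hdrop, hD]
    have hc : l[pvScanVerb l 0] = c := by injection hcons
    have ht : l.drop (pvScanVerb l 0 + 1) = t := by injection hcons
    rw [if_neg hnil, dif_pos hlt, hverb, hc, ← hi, hdrop, hD]
    by_cases hsep : pvSep c
    · rw [if_pos hsep, drop_scanSpace, ht]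
      simp [hsep]
    · rw [if_neg hsep, drop_scanSpace, hdrop, hD]
      simp [hsep]

theorem split_dispatch_verb_py_spec : Claim_equal_split_dispatch_verb_py := by
  intro prompt _
  unfold Spec_split_dispatch_verb_py split_dispatch_verb_py split_dispatch_verb_py_alt
  exact main_core _
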